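-- pv_equiv track=rewrite | github.com/tvotyakov/codeeval | easy/find-the-highest-score/code.py | calc_max_scores
-- ===== SOURCE A (Python) =====
-- def calc_max_scores(in_data):
--     ''' (iterator of lists of interger) -> list of integers
--
--     Expects an iterator (generator or list) of lists of integers. Each list
--     represents a row of 2D-matrix of integer scores. All lists should be of an
--     equal length. Returns a list of integers with the highest score in each column
--     of the matrix.
--
--     >>> calc_max_scores([])
--     []
--
--     >>> calc_max_scores([[]])
--     []
--
--     >>> calc_max_scores([[1], [2]])
--     [2]
--
--     >>> calc_max_scores([[1, 2]])
--     [1, 2]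
--
--     >>> calc_max_scores([[1, 2], [3, 4]])
--     [3, 4]
--
--     >>> calc_max_scores([[72, 64, 150], [100, 18, 33], [13, 250, -6]])
--     [100, 250, 150]
--
--     >>> calc_max_scores([[10, 25, -30, 44], [5, 16, 70, 8], [13, 1, 31, 12]])
--     [13, 25, 70, 44]
--     '''
--     result = []
--     for row in in_data:
--         if not result:
--             result = row[:]
--             continue
--         for col, val in enumerate(row):
--             if val > result[col]:
--                 result[col] = val
--     return result
-- ===== SOURCE B (Python) =====
-- def calc_max_scores(in_data):
--     rows = list(in_data)
--     width = max(map(len, rows), default=0)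
--     return [max(row[c] for row in rows if c < len(row)) for c in range(width)]
-- ===== Notes on version B (the rewrite author's own statement) =====
-- stated objective: alternative
-- what changed: B computes the matrix width once and takes each column's maximum directly with a column-major comprehension over the entries present in that column, replacing A's row-by-row streaming update with its first-row copy special case and in-place element comparisons; Pre_ excludes only the ragged inputs on which A raises IndexError (a row longer than the first nonempty row).
import Mathlib
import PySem

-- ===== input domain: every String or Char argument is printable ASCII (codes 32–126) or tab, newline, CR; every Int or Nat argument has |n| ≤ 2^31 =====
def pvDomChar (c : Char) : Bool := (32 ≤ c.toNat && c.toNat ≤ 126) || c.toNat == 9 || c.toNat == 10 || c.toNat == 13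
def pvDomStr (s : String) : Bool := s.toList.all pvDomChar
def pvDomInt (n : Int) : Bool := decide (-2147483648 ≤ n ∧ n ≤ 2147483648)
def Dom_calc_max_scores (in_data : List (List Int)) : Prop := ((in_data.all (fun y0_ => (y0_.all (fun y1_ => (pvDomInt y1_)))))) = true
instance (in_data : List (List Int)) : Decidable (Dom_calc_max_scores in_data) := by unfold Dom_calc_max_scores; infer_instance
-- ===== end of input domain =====

-- B computes the matrix width once and takes each column's maximum directly
-- (column-major comprehension over the entries present in that column), replacing A's
-- row-by-row streaming update with its first-row copy special case and in-place comparisons.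

-- ===== PORT A =====
-- result[col] / result[col] = val: in range wherever A returns (Pre_ below); the pyGetD default is never used there.
def calc_max_scores (in_data : List (List Int)) : List Int :=
  in_data.foldl
    (fun result row =>
      if result = [] then row
      else
        (PySem.List.enumerate row).foldl
          (fun res cv =>
            if cv.2 > PySem.List.pyGetD res cv.1 0 then PySem.List.pySetD res cv.1 cv.2 else res)
          result)
    []

-- ===== PORT B =====
-- Source B: width = max(map(len, rows), default=0) is a running max over the row lengths;
-- 'row[c] for row in rows if c < len(row)' is filterMap (row[c]?); max(...) is
-- PySem.List.max? (nonempty for every c < width, so the getD default is never used).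
def calc_max_scores_alt (in_data : List (List Int)) : List Int :=
  (List.range (in_data.foldl (fun m s => max m s.length) 0)).map
    (fun c => (PySem.List.max? (in_data.filterMap (fun row => row[c]?)) (fun y => y)).getD 0)

-- ===== PRECONDITION & SPEC =====
-- Pre_ = exactly the inputs on which A returns: no row after the first nonempty row is longer
-- than that row (otherwise result[col] raises IndexError on the first out-of-range column).
def Pre_calc_max_scores (in_data : List (List Int)) : Prop :=
  ∀ s ∈ in_data.dropWhile List.isEmpty, s.length ≤ ((in_data.dropWhile List.isEmpty).headD []).length
instance (in_data : List (List Int)) : Decidable (Pre_calc_max_scores in_data) := by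
  unfold Pre_calc_max_scores; infer_instance

def pvWitness_calc_max_scores : List (List Int) := [[72, 64, 150], [100, 18, 33], [13, 250, -6]]

def Spec_calc_max_scores (in_data : List (List Int)) (out : List Int) : Prop := out = calc_max_scores_alt in_data
instance (in_data : List (List Int)) (out : List Int) : Decidable (Spec_calc_max_scores in_data out) := by unfold Spec_calc_max_scores; infer_instance

-- ===== CLAIM (what is proved, stated in full; the proofs are below) =====
def Claim_equal_calc_max_scores : Prop := ∀ (in_data : List (List Int)), Dom_calc_max_scores in_data → Pre_calc_max_scores in_data → Spec_calc_max_scores in_data (calc_max_scores in_data)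

-- ===== LEMMAS AND PROOFS =====

theorem pv_if_gt_eq_max (c v : Int) : (if v > c then v else c) = max c v := by
  rcases max_cases c v with ⟨h, _⟩ | ⟨h, _⟩ <;> rw [h] <;> split <;> omega

-- abbreviation used only by the proofs: one outer step of A as a pure pointwise-max update
def pvStep (res row : List Int) : List Int :=
  List.zipWith max res row ++ res.drop row.length

-- A's inner loop on a row no longer than the running result is pvStep.
theorem pv_inner_eq (row : List Int) : ∀ (pre res : List Int), row.length ≤ res.length →
    (PySem.List.enumerate row (pre.length : Int)).foldl
      (fun res cv =>
        if cv.2 > PySem.List.pyGetD res cv.1 0 then PySem.List.pySetD res cv.1 cv.2 else res)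
      (pre ++ res)
    = pre ++ pvStep res row := by
  induction row with
  | nil => intro pre res _; simp [PySem.List.enumerate_nil, pvStep]
  | cons v row ih =>
    intro pre res h
    rcases res with _ | ⟨c, res⟩
    · simp at h
    · rw [PySem.List.enumerate_cons, List.foldl_cons]
      have hget : PySem.List.pyGetD (pre ++ c :: res) ((pre.length : Int)) 0 = c := by
        rw [PySem.List.pyGetD_natCast]
        simp [List.getD]
      have hset : PySem.List.pySetD (pre ++ c :: res) ((pre.length : Int)) v = pre ++ v :: res := by
        rw [PySem.List.pySetD_natCast]
        simp [List.set_append_right _ _ (Nat.le_refl _)]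
      have key : ∀ x : List Int, x = pre ++ (if v > c then v else c) :: res →
          (PySem.List.enumerate row ((pre.length : Int) + 1)).foldl
            (fun res cv =>
              if cv.2 > PySem.List.pyGetD res cv.1 0 then PySem.List.pySetD res cv.1 cv.2 else res)
            x = pre ++ pvStep (c :: res) (v :: row) := by
        intro x hx
        have h1 : ((pre.length : Int) + 1) = (((pre ++ [(if v > c then v else c)]).length : Int)) := by
          simp
        rw [hx, h1, ← List.singleton_append, ← List.append_assoc,
          ih (pre ++ [(if v > c then v else c)]) res (by simpa using h)]
        simp [pvStep, pv_if_gt_eq_max]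
      split
      · exact key _ (by rw [hset]; simp_all)
      · exact key _ (by rw [hget] at *; simp_all)

-- A ignores leading empty rows (the copy branch just re-copies the empty row)
theorem pv_drop_empty (in_data : List (List Int)) :
    in_data.foldl
      (fun result row =>
        if result = [] then row
        else
          (PySem.List.enumerate row).foldl
            (fun res cv =>
              if cv.2 > PySem.List.pyGetD res cv.1 0 then PySem.List.pySetD res cv.1 cv.2 else res)
            result)
      []
    = (in_data.dropWhile List.isEmpty).foldl
      (fun result row =>
        if result = [] then row
        else
          (PySem.List.enumerate row).foldl
            (fun res cv =>
              if cv.2 > PySem.List.pyGetD res cv.1 0 then PySem.List.pySetD res cv.1 cv.2 else res)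
            result)
      [] := by
  induction in_data with
  | nil => rfl
  | cons s l ih =>
    rcases s with _ | ⟨x, t⟩
    · simpa using ih
    · rfl

theorem pv_pvStep_length (res row : List Int) (h : row.length ≤ res.length) :
    (pvStep res row).length = res.length := by
  simp [pvStep]
  omega

-- A's fold from a nonempty result over rows that fit is the pvStep fold
theorem pv_A_eq_step_fold : ∀ (rs : List (List Int)) (r : List Int), r ≠ [] →
    (∀ s ∈ rs, s.length ≤ r.length) →
    rs.foldl
      (fun result row =>
        if result = [] then row
        else
          (PySem.List.enumerate row).foldl
            (fun res cv =>
              if cv.2 > PySem.List.pyGetD res cv.1 0 then PySem.List.pySetD res cv.1 cv.2 else res)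
            result)
      r
    = rs.foldl pvStep r := by
  intro rs
  induction rs with
  | nil => intro r _ _; rfl
  | cons row rs ih =>
    intro r hr hlen
    have hrow : row.length ≤ r.length := hlen row (by simp)
    have step : (PySem.List.enumerate row (0 : Int)).foldl
        (fun res cv =>
          if cv.2 > PySem.List.pyGetD res cv.1 0 then PySem.List.pySetD res cv.1 cv.2 else res)
        r = pvStep r row := by
      simpa using pv_inner_eq row [] r hrow
    have hne : pvStep r row ≠ [] := by
      intro hc
      have hl := pv_pvStep_length r row hrow
      rw [hc] at hl
      exact hr (List.length_eq_zero_iff.mp hl.symm)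
    simp only [List.foldl_cons, if_neg hr, step]
    exact ih _ hne (fun s hs => by
      rw [pv_pvStep_length r row hrow]; exact hlen s (by simp [hs]))

-- pvStep fold keeps the result length
theorem pv_fold_length : ∀ (rs : List (List Int)) (r : List Int),
    (∀ s ∈ rs, s.length ≤ r.length) → (rs.foldl pvStep r).length = r.length := by
  intro rs
  induction rs with
  | nil => intro r _; rfl
  | cons s rs ih =>
    intro r hlen
    have hs : s.length ≤ r.length := hlen s (by simp)
    rw [List.foldl_cons, ih (pvStep r s) (fun t ht => by
      rw [pv_pvStep_length r s hs]; exact hlen t (by simp [ht]))]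
    exact pv_pvStep_length r s hs

-- pointwise: entry c of the pvStep fold is the running max of the entries present in column c
theorem pv_fold_getElem? : ∀ (rs : List (List Int)) (r : List Int) (c : Nat)
    (hc : c < r.length), (∀ s ∈ rs, s.length ≤ r.length) →
    (rs.foldl pvStep r)[c]? = some ((rs.filterMap (fun row => row[c]?)).foldl max r[c]) := by
  intro rs
  induction rs with
  | nil => intro r c hc _; simp [List.getElem?_eq_getElem hc]
  | cons s rs ih =>
    intro r c hc hlen
    have hs : s.length ≤ r.length := hlen s (by simp)
    have hc2 : c < (pvStep r s).length := by rw [pv_pvStep_length r s hs]; exact hc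
    have hlen2 : ∀ t ∈ rs, t.length ≤ (pvStep r s).length := by
      intro t ht; rw [pv_pvStep_length r s hs]; exact hlen t (by simp [ht])
    rw [List.foldl_cons, ih (pvStep r s) c hc2 hlen2]
    by_cases hcs : c < s.length
    · have hval : (pvStep r s)[c] = max r[c] s[c] := by
        have : (pvStep r s)[c]? = some (max r[c] s[c]) := by
          rw [pvStep, List.getElem?_append_left (by simp; omega),
            List.getElem?_zipWith, List.getElem?_eq_getElem hc, List.getElem?_eq_getElem hcs]
        rw [List.getElem?_eq_getElem hc2] at this
        exact Option.some.inj this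
      rw [List.filterMap_cons, List.getElem?_eq_getElem hcs]
      simp [hval]
    · have hval : (pvStep r s)[c] = r[c] := by
        have : (pvStep r s)[c]? = some r[c] := by
          rw [pvStep, List.getElem?_append_right (by simp; omega), List.getElem?_drop]
          simp only [List.length_zipWith]
          rw [show s.length + (c - min r.length s.length) = c by omega,
            List.getElem?_eq_getElem hc]
        rw [List.getElem?_eq_getElem hc2] at this
        exact Option.some.inj this
      rw [List.filterMap_cons, List.getElem?_eq_none (by omega)]
      simp [hval]

-- the pvStep fold IS the column-max table
theorem pv_main (rs : List (List Int)) (r : List Int)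
    (hlen : ∀ s ∈ rs, s.length ≤ r.length) :
    rs.foldl pvStep r
      = (List.range r.length).map (fun c =>
          (PySem.List.max? ((r :: rs).filterMap (fun row => row[c]?)) (fun y => y)).getD 0) := by
  apply List.ext_getElem?
  intro c
  by_cases hc : c < r.length
  · rw [pv_fold_getElem? rs r c hc hlen]
    rw [List.getElem?_map, List.getElem?_range hc]
    simp only [Option.map_some]
    rw [List.filterMap_cons, List.getElem?_eq_getElem hc]
    simp [PySem.List.max?_id_cons]
  · rw [List.getElem?_eq_none, List.getElem?_eq_none]
    · simpa using hc
    · rw [pv_fold_length rs r hlen]; omega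

-- the running max of the row lengths, over rows no longer than the accumulator, is the accumulator
theorem pv_maxlen (rs : List (List Int)) (L : Nat)
    (h : ∀ s ∈ rs, s.length ≤ L) : rs.foldl (fun m s => max m s.length) L = L := by
  induction rs with
  | nil => rfl
  | cons s rs ih =>
    rw [List.foldl_cons, max_eq_left (h s (by simp))]
    exact ih (fun t ht => h t (by simp [ht]))

-- leading empty rows contribute nothing to width or to any column
theorem pv_empty_prefix (t : List (List Int)) (h : ∀ s ∈ t, s = ([] : List Int)) :
    (∀ (init : Nat), t.foldl (fun m s => max m s.length) init = init) ∧
    (∀ (c : Nat), t.filterMap (fun row => row[c]?) = []) := by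
  induction t with
  | nil => exact ⟨fun _ => rfl, fun _ => rfl⟩
  | cons s t ih =>
    obtain ⟨ih1, ih2⟩ := ih (fun u hu => h u (by simp [hu]))
    have hs : s = [] := h s (by simp)
    subst hs
    exact ⟨fun init => by simpa using ih1 init, fun c => by simpa using ih2 c⟩

-- ===== VERDICT (by name: the statement is the Claim_ definition above) =====
theorem calc_max_scores_spec : Claim_equal_calc_max_scores := by
  intro in_data _ hpre
  unfold Spec_calc_max_scores
  unfold Pre_calc_max_scores at hpre
  unfold calc_max_scores calc_max_scores_alt
  have hsplit : in_data.takeWhile List.isEmpty ++ in_data.dropWhile List.isEmpty = in_data :=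
    List.takeWhile_append_dropWhile
  have htE : ∀ s ∈ in_data.takeWhile List.isEmpty, s = ([] : List Int) := by
    intro s hs
    simpa using List.mem_takeWhile_imp hs
  obtain ⟨hwidth0, hcol0⟩ := pv_empty_prefix _ htE
  rw [pv_drop_empty]
  rcases hrest : in_data.dropWhile List.isEmpty with _ | ⟨r, rs⟩
  · rw [← hsplit, hrest, List.append_nil, hwidth0 0]
    rfl
  · rw [hrest] at hpre
    have hr : r ≠ [] := by
      have h1 : in_data.dropWhile List.isEmpty ≠ [] := by simp [hrest]
      have h2 := List.head_dropWhile_not List.isEmpty h1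
      rw [show (in_data.dropWhile List.isEmpty).head h1 = r by simp [hrest]] at h2
      simpa using h2
    have hlen : ∀ s ∈ rs, s.length ≤ r.length := by
      intro s hs
      simpa using hpre s (by simp [hs])
    have hle : ∀ s ∈ r :: rs, s.length ≤ r.length := by
      intro s hs
      rcases List.mem_cons.mp hs with h | h
      · simp [h]
      · exact hlen s h
    rw [List.foldl_cons, if_pos rfl, pv_A_eq_step_fold rs r hr hlen, pv_main rs r hlen,
      ← hsplit, hrest, List.foldl_append, hwidth0 0,
      show (r :: rs).foldl (fun m s => max m s.length) 0 = r.length by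
        rw [List.foldl_cons, Nat.max_eq_right (Nat.zero_le _)]
        exact pv_maxlen rs r.length hlen]
    apply List.map_congr_left
    intro c _
    rw [List.filterMap_append, hcol0 c, List.nil_append]
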